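-- pv_equiv track=rewrite | github.com/IA-Generative/abrege | api/utils/text.py | split_texts_by_word_limit
-- ===== SOURCE A (Python) =====
-- from typing import List
--
-- def split_texts_by_word_limit(texts: List[str], max_words: int) -> List[str]:
--     all_chunks = []
--     chunk = []
--
--     for i, text in enumerate(texts):
--         text = f"Page{i + 1}: {text}"
--         words = text.split()
--
--         for word in words:
--             chunk.append(word)
--             if len(chunk) >= max_words:
--                 all_chunks.append(" ".join(chunk))
--                 chunk = []
--
--     if chunk:
--         all_chunks.append(f"Page{i + 1}:" + " ".join(chunk))
--
--     return all_chunks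
-- ===== SOURCE B (Python) =====
-- def split_texts_by_word_limit(texts, max_words):
--     tokens = [w for page, text in enumerate(texts, 1)
--               for w in f"Page{page}: {text}".split()]
--     chunks = [" ".join(tokens[i:i + max_words])
--               for i in range(0, len(tokens), max_words)]
--     if len(tokens) % max_words:
--         chunks[-1] = f"Page{len(texts)}:" + chunks[-1]
--     return chunks
-- ===== Notes on version B (the rewrite author's own statement) =====
-- stated objective: simpler
-- what changed: A interleaves splitting and chunking in two nested loops with a carried partial-chunk buffer; B first flattens all prefixed page texts into one token list by a comprehension, then slices it into blocks of max_words with a stepped range, finally tagging a trailing partial block. Pre_ excludes non-positive max_words, on which A's flush-every-word output is an accident of its '>=' flush test and B's stepped range raises or misbehaves.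
-- outside the precondition, e.g. on split_texts_by_word_limit(['a'], 0): A returns ['Page1:', 'a'], B raises ValueError; on split_texts_by_word_limit(['a'], -1): A returns ['Page1:', 'a'], B returns []
import Mathlib
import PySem

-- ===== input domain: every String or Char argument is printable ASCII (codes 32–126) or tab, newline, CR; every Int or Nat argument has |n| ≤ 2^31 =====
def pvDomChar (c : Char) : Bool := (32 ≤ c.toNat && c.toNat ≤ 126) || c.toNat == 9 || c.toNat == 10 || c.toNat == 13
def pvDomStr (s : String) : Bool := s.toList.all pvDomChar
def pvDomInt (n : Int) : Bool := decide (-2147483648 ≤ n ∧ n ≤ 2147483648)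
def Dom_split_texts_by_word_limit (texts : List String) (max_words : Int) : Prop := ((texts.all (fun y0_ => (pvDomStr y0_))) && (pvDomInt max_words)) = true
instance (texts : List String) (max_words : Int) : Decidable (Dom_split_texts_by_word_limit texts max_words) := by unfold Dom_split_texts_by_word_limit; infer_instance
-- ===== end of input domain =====

-- B replaces A's two nested loops (with a carried partial-chunk buffer) by a flatten-then-slice
-- decomposition: build the full prefixed token list, slice it with a stepped range, tag a
-- trailing partial block (objective: simpler).

-- ===== PORT A =====
-- inner-loop body of A: append the word to chunk, flush when len(chunk) >= max_words
def pvStepA (max_words : Int) (st : List String × List String) (w : String) :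
    List String × List String :=
  let chunk := st.2 ++ [w]
  if max_words ≤ PySem.List.len chunk then (st.1 ++ [PySem.Str.join " " chunk], [])
  else (st.1, chunk)

-- body of A's outer 'for i, text in enumerate(texts)' loop; the last component records i
def pvPageA (max_words : Int) (st : (List String × List String) × Int) (it : Int × String) :
    (List String × List String) × Int :=
  ((PySem.Str.split₀ ("Page" ++ PySem.Int.toStr (it.1 + 1) ++ ": " ++ it.2)).foldl
      (pvStepA max_words) st.1,
   it.1)

def split_texts_by_word_limit (texts : List String) (max_words : Int) : List String :=
  -- i starts undefined in Python; 0 here is dead unless the loop ran (chunk = [] otherwise)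
  let r := (PySem.List.enumerate texts).foldl (pvPageA max_words) (([], []), 0)
  if r.1.2 = [] then r.1.1
  else r.1.1 ++ ["Page" ++ PySem.Int.toStr (r.2 + 1) ++ ":" ++ PySem.Str.join " " r.1.2]

-- ===== PORT B =====
-- element of B's token comprehension: f"Page{page}: {text}".split()
def pvTokFB (it : Int × String) : List String :=
  PySem.Str.split₀ ("Page" ++ PySem.Int.toStr it.1 ++ ": " ++ it.2)

def split_texts_by_word_limit_alt (texts : List String) (max_words : Int) : List String :=
  let tokens := (PySem.List.enumerate texts 1).flatMap pvTokFB
  let chunks := (PySem.List.pyRange 0 (PySem.List.len tokens) max_words).map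
      (fun i => PySem.Str.join " " (PySem.List.slice tokens (some i) (some (i + max_words))))
  -- chunks[-1] = f"Page{len(texts)}:" + chunks[-1]; with max_words ≥ 1 this branch only runs
  -- on nonempty chunks, so pyGet? at -1 is some (Python would raise IndexError on [])
  if PySem.Int.mod (PySem.List.len tokens) max_words ≠ 0 then
    chunks.dropLast ++
      ["Page" ++ PySem.Int.toStr (PySem.List.len texts) ++ ":" ++
        ((PySem.List.pyGet? chunks (-1)).getD "")]
  else chunks

-- ===== PRECONDITION & SPEC =====
-- Pre_ excludes non-positive max_words, on which A's flush-every-word output is an accident of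
-- its '>=' flush test and B's stepped range raises ValueError (or hits an empty chunks[-1]).
def Pre_split_texts_by_word_limit (texts : List String) (max_words : Int) : Prop :=
  1 ≤ max_words
instance (texts : List String) (max_words : Int) : Decidable (Pre_split_texts_by_word_limit texts max_words) := by unfold Pre_split_texts_by_word_limit; infer_instance

def pvWitness_split_texts_by_word_limit : List String × Int := (["hello world", "bye"], 2)

def Spec_split_texts_by_word_limit (texts : List String) (max_words : Int) (out : List String) : Prop := out = split_texts_by_word_limit_alt texts max_words
instance (texts : List String) (max_words : Int) (out : List String) : Decidable (Spec_split_texts_by_word_limit texts max_words out) := by unfold Spec_split_texts_by_word_limit; infer_instance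

-- ===== CLAIM (what is proved, stated in full; the proofs are below) =====
def Claim_equal_split_texts_by_word_limit : Prop := ∀ (texts : List String) (max_words : Int), Dom_split_texts_by_word_limit texts max_words → Pre_split_texts_by_word_limit texts max_words → Spec_split_texts_by_word_limit texts max_words (split_texts_by_word_limit texts max_words)

-- ===== LEMMAS AND PROOFS =====

-- ---- proof-only helpers ----

-- the flattened token list, in A's enumerate-from-0 form
def pvTokensB (texts : List String) : List String :=
  (PySem.List.enumerate texts).flatMap
    (fun it => PySem.Str.split₀ ("Page" ++ PySem.Int.toStr (it.1 + 1) ++ ": " ++ it.2))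

-- recursive block-peeling form shared by both reductions
def pvChunkB (p : String) (m : Nat) (tokens chunks : List String) : List String :=
  match tokens with
  | [] => chunks
  | w :: rest =>
    let block := w :: rest.take (m - 1)
    let c := if block.length = m then PySem.Str.join " " block
             else p ++ PySem.Str.join " " block
    pvChunkB p m (rest.drop (m - 1)) (chunks ++ [c])
termination_by tokens.length
decreasing_by simp [List.length_drop]

def pvFinish (p : String) (st : List String × List String) : List String :=
  if st.2 = [] then st.1 else st.1 ++ [p ++ PySem.Str.join " " st.2]

-- the block list B's stepped-range comprehension denotes, in Nat form
def pvBlocks (M : Nat) (tokens : List String) : List String :=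
  (List.range ((tokens.length + M - 1) / M)).map
    (fun k => PySem.Str.join " " ((tokens.drop (M * k)).take M))

-- B's patch of the trailing partial block, in Nat form
def pvPatched (p : String) (M : Nat) (tokens : List String) : List String :=
  if tokens.length % M ≠ 0
  then (pvBlocks M tokens).dropLast ++ [p ++ (pvBlocks M tokens).getLastD ""]
  else pvBlocks M tokens

-- ---- lemmas ----

theorem pvChunkB_nil (p : String) (M : Nat) (acc : List String) :
    pvChunkB p M [] acc = acc := by
  rw [pvChunkB]

theorem pvChunkB_cons (p : String) (M : Nat) (w : String) (rest acc : List String) :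
    pvChunkB p M (w :: rest) acc =
      pvChunkB p M (rest.drop (M - 1))
        (acc ++ [if (w :: rest.take (M - 1)).length = M
                 then PySem.Str.join " " (w :: rest.take (M - 1))
                 else p ++ PySem.Str.join " " (w :: rest.take (M - 1))]) := by
  rw [pvChunkB]

theorem pvChunkB_acc (p : String) (M : Nat) :
    ∀ (n : Nat) (tokens : List String), tokens.length ≤ n → ∀ acc,
      pvChunkB p M tokens acc = acc ++ pvChunkB p M tokens [] := by
  intro n
  induction n with
  | zero =>
    intro tokens h acc
    have : tokens = [] := List.eq_nil_of_length_eq_zero (by omega)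
    subst this; rw [pvChunkB_nil, pvChunkB_nil]; simp
  | succ n ih =>
    intro tokens h acc
    match tokens with
    | [] => rw [pvChunkB_nil, pvChunkB_nil]; simp
    | w :: rest =>
      rw [pvChunkB_cons, pvChunkB_cons]
      rw [ih (rest.drop (M - 1)) (by simp at h ⊢; omega),
          ih (rest.drop (M - 1)) (by simp at h ⊢; omega) ([] ++ [_])]
      simp

-- the inner fold, started on a partial chunk c, flushes exactly one block of M words
theorem pv_fold_block (M : Nat) (tokens : List String) :
    ∀ c acc, c.length < M →
      List.foldl (pvStepA (M : Int)) (acc, c) tokens =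
        if tokens.length + c.length < M then (acc, c ++ tokens)
        else List.foldl (pvStepA (M : Int))
              (acc ++ [PySem.Str.join " " (c ++ tokens.take (M - c.length))], [])
              (tokens.drop (M - c.length)) := by
  induction tokens with
  | nil =>
    intro c acc hc
    simp [hc]
  | cons w rest ih =>
    intro c acc hc
    by_cases hfl : c.length + 1 = M
    · have h1 : (M : Int) ≤ PySem.List.len (c ++ [w]) := by
        simp [PySem.List.len]; omega
      have h2 : ¬ ((w :: rest).length + c.length < M) := by simp; omega
      have h3 : M - c.length = 1 := by omega
      simp only [List.foldl_cons, pvStepA, h1, if_pos, h2, if_neg, h3, not_false_iff]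
      simp
    · have h1 : ¬ ((M : Int) ≤ PySem.List.len (c ++ [w])) := by
        simp [PySem.List.len]; omega
      have hc' : (c ++ [w]).length < M := by simp; omega
      simp only [List.foldl_cons, pvStepA, h1, if_neg, not_false_iff]
      rw [ih (c ++ [w]) acc hc']
      have hlen : (c ++ [w]).length = c.length + 1 := by simp
      rw [hlen]
      have h4 : M - c.length = (M - (c.length + 1)) + 1 := by omega
      by_cases h5 : rest.length + (c.length + 1) < M
      · have h6 : (w :: rest).length + c.length < M := by simp; omega
        rw [if_pos h5, if_pos h6]
        simp
      · have h6 : ¬ ((w :: rest).length + c.length < M) := by simp; omega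
        rw [if_neg h5, if_neg h6, h4]
        simp [List.take_succ_cons, List.drop_succ_cons]

-- the flushing fold plus the final partial-chunk append IS the block-peeling recursion
theorem pv_fold_eq_chunk (p : String) (M : Nat) (hM : 1 ≤ M) :
    ∀ (n : Nat) (tokens : List String), tokens.length ≤ n → ∀ acc,
      pvFinish p (List.foldl (pvStepA (M : Int)) (acc, []) tokens) =
        pvChunkB p M tokens acc := by
  intro n
  induction n with
  | zero =>
    intro tokens h acc
    have : tokens = [] := List.eq_nil_of_length_eq_zero (by omega)
    subst this
    rw [pvChunkB_nil]
    simp [pvFinish]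
  | succ n ih =>
    intro tokens h acc
    match tokens with
    | [] =>
      rw [pvChunkB_nil]
      simp [pvFinish]
    | w :: rest =>
      rw [pv_fold_block M (w :: rest) [] acc (by simpa using hM), pvChunkB_cons]
      simp only [List.length_nil, Nat.sub_zero, List.nil_append, Nat.add_zero]
      by_cases hlt : (w :: rest).length < M
      · rw [if_pos hlt]
        have htk : rest.take (M - 1) = rest := List.take_of_length_le (by simp at hlt; omega)
        have hdr : rest.drop (M - 1) = [] := List.drop_of_length_le (by simp at hlt; omega)
        have hbl : ¬ ((w :: rest.take (M - 1)).length = M) := by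
          rw [htk]; simp at hlt ⊢; omega
        rw [if_neg hbl, hdr, htk, pvChunkB_nil]
        simp [pvFinish]
      · rw [if_neg hlt]
        have hMpos : M - 1 + 1 = M := by omega
        have htk : (w :: rest).take M = w :: rest.take (M - 1) := by
          conv_lhs => rw [← hMpos]
          rw [List.take_succ_cons]
        have hdr : (w :: rest).drop M = rest.drop (M - 1) := by
          conv_lhs => rw [← hMpos]
          rw [List.drop_succ_cons]
        have hbl : (w :: rest.take (M - 1)).length = M := by
          simp at hlt ⊢; omega
        rw [htk, hdr, if_pos hbl]
        exact ih (rest.drop (M - 1)) (by simp at h ⊢; omega) _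

-- the outer enumerate-fold's chunk state is the inner fold over the flattened tokens
theorem pv_outer_fst (m : Int) (pages : List (Int × String)) :
    ∀ (st : (List String × List String) × Int),
      (pages.foldl (pvPageA m) st).1 =
        List.foldl (pvStepA m) st.1
          (pages.flatMap (fun it =>
            PySem.Str.split₀ ("Page" ++ PySem.Int.toStr (it.1 + 1) ++ ": " ++ it.2))) := by
  induction pages with
  | nil => intro st; simp
  | cons pg rest ih =>
    intro st
    rw [List.foldl_cons, ih, List.flatMap_cons, List.foldl_append]
    rfl

-- the outer fold's last component is the index of the last page
theorem pv_outer_snd (m : Int) (texts : List String) (h : texts ≠ []) :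
    ∀ (s : Int) (st : (List String × List String) × Int),
      ((PySem.List.enumerate texts s).foldl (pvPageA m) st).2 = s + texts.length - 1 := by
  induction texts with
  | nil => exact absurd rfl h
  | cons t rest ih =>
    intro s st
    rw [PySem.List.enumerate_cons, List.foldl_cons]
    by_cases hr : rest = []
    · subst hr
      simp [PySem.List.enumerate_nil, pvPageA]
    · rw [ih hr (s + 1)]
      simp; omega

-- B's comprehension over enumerate(texts, 1) is the flattened list in enumerate-from-0 form
theorem pv_tokens_shift (texts : List String) :
    ∀ (s : Int),
      (PySem.List.enumerate texts (s + 1)).flatMap pvTokFB =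
        (PySem.List.enumerate texts s).flatMap
          (fun it => PySem.Str.split₀ ("Page" ++ PySem.Int.toStr (it.1 + 1) ++ ": " ++ it.2)) := by
  induction texts with
  | nil => intro s; simp [PySem.List.enumerate_nil]
  | cons t rest ih =>
    intro s
    rw [PySem.List.enumerate_cons, PySem.List.enumerate_cons,
        List.flatMap_cons, List.flatMap_cons, ih (s + 1)]
    rfl

theorem pv_tokens_eqB (texts : List String) :
    (PySem.List.enumerate texts 1).flatMap pvTokFB = pvTokensB texts := by
  have h := pv_tokens_shift texts 0
  simpa [pvTokensB] using h

-- port A, re-expressed as the flushing fold over the token list plus the final append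
theorem pv_portA_eq (texts : List String) (m : Int) :
    split_texts_by_word_limit texts m =
      pvFinish ("Page" ++ PySem.Int.toStr (PySem.List.len texts) ++ ":")
        (List.foldl (pvStepA m) ([], []) (pvTokensB texts)) := by
  simp only [split_texts_by_word_limit]
  have hfst : ((PySem.List.enumerate texts).foldl (pvPageA m) (([], []), 0)).1 =
      List.foldl (pvStepA m) ([], []) (pvTokensB texts) := by
    unfold pvTokensB
    exact pv_outer_fst m (PySem.List.enumerate texts) (([], []), 0)
  unfold pvFinish
  rw [hfst]
  by_cases hc : (List.foldl (pvStepA m) ([], []) (pvTokensB texts)).2 = []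
  · rw [if_pos hc, if_pos hc]
  · rw [if_neg hc, if_neg hc]
    have ht : texts ≠ [] := by
      intro he
      apply hc
      subst he
      rfl
    have hsnd := pv_outer_snd m texts ht 0 (([], []), 0)
    have : ((PySem.List.enumerate texts).foldl (pvPageA m) (([], []), 0)).2 + 1
        = PySem.List.len texts := by
      rw [hsnd]; simp [PySem.List.len]
    rw [this]

-- a nonempty list's getLastD ignores the default
theorem pv_getLast_getD_irrel {α : Type} (l : List α) (h : l ≠ []) (a b : α) :
    l.getLast?.getD a = l.getLast?.getD b := by
  cases hx : l.getLast? with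
  | none => exact absurd (List.getLast?_eq_none_iff.mp hx) h
  | some v => simp

-- block count peels one block per M tokens
theorem pv_count_peel (M L : Nat) (hM : 1 ≤ M) (hL : 1 ≤ L) :
    (L + M - 1) / M = (L - M + M - 1) / M + 1 := by
  have h1 : L + M - 1 = (L - 1) + M := by omega
  rw [h1, Nat.add_div_right _ (by omega)]
  by_cases h : M ≤ L
  · have : L - M + M - 1 = L - 1 := by omega
    rw [this]
  · have h2 : L - M = 0 := by omega
    rw [h2]
    have h3 : (L - 1) / M = 0 := Nat.div_eq_of_lt (by omega)
    have h4 : 0 + M - 1 = M - 1 := by omega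
    rw [h3, h4, Nat.div_eq_of_lt (by omega)]

theorem pv_count_pos (M L : Nat) (hM : 1 ≤ M) (hL : 1 ≤ L) :
    1 ≤ (L + M - 1) / M := by
  rw [pv_count_peel M L hM hL]
  exact Nat.le_add_left 1 _

theorem pv_blocks_nil (M : Nat) (hM : 1 ≤ M) : pvBlocks M [] = [] := by
  unfold pvBlocks
  have : (0 + M - 1) / M = 0 := Nat.div_eq_of_lt (by omega)
  simp only [List.length_nil, this, List.range_zero, List.map_nil]

theorem pv_blocks_ne_nil (M : Nat) (hM : 1 ≤ M) (tokens : List String)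
    (h : 1 ≤ tokens.length) : pvBlocks M tokens ≠ [] := by
  unfold pvBlocks
  have hcnt := pv_count_pos M tokens.length hM h
  simp only [ne_eq, List.map_eq_nil_iff, List.range_eq_nil]
  exact Nat.one_le_iff_ne_zero.mp hcnt

theorem pv_patched_nil (p : String) (M : Nat) (hM : 1 ≤ M) : pvPatched p M [] = [] := by
  unfold pvPatched
  simp [pv_blocks_nil M hM]

-- pvBlocks peels its first block
theorem pv_blocks_cons (M : Nat) (hM : 1 ≤ M) (tokens : List String) (h : tokens ≠ []) :
    pvBlocks M tokens =
      PySem.Str.join " " (tokens.take M) :: pvBlocks M (tokens.drop M) := by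
  unfold pvBlocks
  have hL : 1 ≤ tokens.length := by
    cases tokens with
    | nil => exact absurd rfl h
    | cons x xs => simp
  rw [List.length_drop, pv_count_peel M tokens.length hM hL, List.range_succ_eq_map]
  rw [List.map_cons, List.map_map]
  congr 1
  apply List.map_congr_left
  intro a _
  simp only [Function.comp_apply]
  rw [Nat.mul_succ, List.drop_drop, Nat.add_comm (M * a) M]

-- the peeling recursion equals blocks-then-patch
theorem pv_chunk_eq_patched (p : String) (M : Nat) (hM : 1 ≤ M) :
    ∀ (n : Nat) (tokens : List String), tokens.length ≤ n →
      pvChunkB p M tokens [] = pvPatched p M tokens := by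
  intro n
  induction n with
  | zero =>
    intro tokens h
    have : tokens = [] := List.eq_nil_of_length_eq_zero (by omega)
    subst this
    rw [pvChunkB_nil, pv_patched_nil p M hM]
  | succ n ih =>
    intro tokens h
    match tokens with
    | [] =>
      rw [pvChunkB_nil, pv_patched_nil p M hM]
    | w :: rest =>
      have hMpos : M - 1 + 1 = M := by omega
      have htk : (w :: rest).take M = w :: rest.take (M - 1) := by
        conv_lhs => rw [← hMpos]; rw [List.take_succ_cons]
      have hdr : (w :: rest).drop M = rest.drop (M - 1) := by
        conv_lhs => rw [← hMpos]; rw [List.drop_succ_cons]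
      have hpeel := pv_blocks_cons M hM (w :: rest) (by simp)
      rw [htk, hdr] at hpeel
      have hdlen : (rest.drop (M - 1)).length ≤ n := by
        simp at h ⊢
        omega
      rw [pvChunkB_cons, pvChunkB_acc p M n (rest.drop (M - 1)) hdlen, ih _ hdlen]
      by_cases hful : M ≤ (w :: rest).length
      · -- first block is full
        have hbl : (w :: rest.take (M - 1)).length = M := by
          simp at hful ⊢; omega
        rw [if_pos hbl]
        have hmod : (w :: rest).length % M = (rest.drop (M - 1)).length % M := by
          have hl : (w :: rest).length = (rest.drop (M - 1)).length + M := by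
            simp at hful ⊢; omega
          rw [hl, Nat.add_mod_right]
        unfold pvPatched
        rw [hpeel, hmod]
        by_cases hz : (rest.drop (M - 1)).length % M ≠ 0
        · rw [if_pos hz, if_pos hz]
          have hlen1 : 1 ≤ (rest.drop (M - 1)).length := by
            by_contra hcon
            apply hz
            have : (rest.drop (M - 1)).length = 0 := by omega
            rw [this]; simp
          have hne := pv_blocks_ne_nil M hM (rest.drop (M - 1)) hlen1
          rw [List.dropLast_cons_of_ne_nil hne, List.getLastD_cons]
          simp
          exact pv_getLast_getD_irrel _ hne _ _
        · rw [if_neg hz, if_neg hz]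
          simp
      · -- first (and only) block is partial
        have htkr : rest.take (M - 1) = rest := List.take_of_length_le (by simp at hful; omega)
        have hbl : ¬ ((w :: rest.take (M - 1)).length = M) := by
          rw [htkr]; simp at hful ⊢; omega
        rw [if_neg hbl]
        have hdrn : rest.drop (M - 1) = [] := List.drop_of_length_le (by simp at hful; omega)
        have hmod : (w :: rest).length % M ≠ 0 := by
          have : (w :: rest).length % M = (w :: rest).length := Nat.mod_eq_of_lt (by omega)
          rw [this]; simp
        rw [hdrn, pv_patched_nil p M hM]
        unfold pvPatched
        rw [if_pos hmod, hpeel, hdrn, pv_blocks_nil M hM]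
        simp [List.getLastD]

-- PySem casts: floor-mod of naturals is Nat mod
theorem pv_mod_cast (a b : Nat) : PySem.Int.mod (a : Int) (b : Int) = ((a % b : Nat) : Int) := by
  simp [PySem.Int.mod, Int.fmod_eq_emod]

-- (xs pyGet -1).getD d = xs.getLastD d for nonempty xs (both are the last element)
theorem pv_pyGet_neg_one {α : Type} (xs : List α) (h : xs ≠ []) (d : α) :
    (PySem.List.pyGet? xs (-1)).getD d = xs.getLastD d := by
  have hl : 1 ≤ xs.length := by
    cases xs with
    | nil => exact absurd rfl h
    | cons x t => simp
  simp only [PySem.List.pyGet?, PySem.List.pyIdx?]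
  have h1 : ¬ ((0 : Int) ≤ -1) := by omega
  have h2 : -(xs.length : Int) ≤ -1 := by omega
  rw [if_neg h1, if_pos h2]
  have h3 : (-(-1 : Int)).toNat = 1 := by norm_num
  rw [h3, show (some (xs.length - 1)).bind (fun k => xs[k]?) = xs[xs.length - 1]? from rfl]
  have h4 : xs.length - 1 < xs.length := by omega
  simp only [List.getElem?_eq_getElem h4, Option.getD_some]
  rw [List.getLastD_eq_getLast?, List.getLast?_eq_getElem?,
      List.getElem?_eq_getElem h4, Option.getD_some]

-- port B with a Nat word limit, re-expressed through pvPatched over the flattened token list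
theorem pv_portB_eq (texts : List String) (M : Nat) (hM : 1 ≤ M) :
    split_texts_by_word_limit_alt texts (M : Int) =
      pvPatched ("Page" ++ PySem.Int.toStr (PySem.List.len texts) ++ ":") M
        (pvTokensB texts) := by
  simp only [split_texts_by_word_limit_alt]
  rw [pv_tokens_eqB]
  set tokens := pvTokensB texts with htok
  -- the chunks comprehension is pvBlocks
  have hcount : (PySem.List.pyRange 0 (PySem.List.len tokens) (M : Int)).map
      (fun i => PySem.Str.join " " (PySem.List.slice tokens (some i) (some (i + (M : Int))))) =
      pvBlocks M tokens := by
    rw [PySem.List.pyRange_of_pos 0 (PySem.List.len tokens) (by omega)]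
    rw [List.map_map]
    unfold pvBlocks
    have hn : (if (0 : Int) < PySem.List.len tokens
        then ((PySem.List.len tokens - 0 + (M : Int) - 1) / (M : Int)).toNat else 0) =
        (tokens.length + M - 1) / M := by
      by_cases h0 : (0 : Int) < PySem.List.len tokens
      · rw [if_pos h0]
        have hlen : PySem.List.len tokens = (tokens.length : Int) := by
          simp [PySem.List.len]
        rw [hlen] at h0
        have he : PySem.List.len tokens - 0 + (M : Int) - 1
            = ((tokens.length + M - 1 : Nat) : Int) := by
          rw [hlen]; omega
        have hdivc : ((tokens.length + M - 1 : Nat) : Int) / ((M : Nat) : Int)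
            = (((tokens.length + M - 1) / M : Nat) : Int) := by exact_mod_cast rfl
        rw [he, hdivc, Int.toNat_natCast]
      · rw [if_neg h0]
        have hlen : PySem.List.len tokens = (tokens.length : Int) := by
          simp [PySem.List.len]
        rw [hlen] at h0
        have hlen0 : tokens.length = 0 := by omega
        rw [hlen0]
        have : (0 + M - 1) / M = 0 := Nat.div_eq_of_lt (by omega)
        rw [this]
    rw [hn]
    apply List.map_congr_left
    intro k _
    simp only [Function.comp_apply, zero_add]
    have hi : (M : Int) * (k : Int) = ((M * k : Nat) : Int) := by push_cast; ring
    rw [hi, PySem.List.slice_natCast_add tokens (M * k) M]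
  rw [hcount]
  -- the patch condition is the Nat mod test
  have hmodc : PySem.Int.mod (PySem.List.len tokens) (M : Int)
      = ((tokens.length % M : Nat) : Int) := by
    have hlc : PySem.List.len tokens = ((tokens.length : Nat) : Int) := by
      simp [PySem.List.len]
    rw [hlc, pv_mod_cast]
  unfold pvPatched
  by_cases hz : tokens.length % M ≠ 0
  · have hz' : PySem.Int.mod (PySem.List.len tokens) (M : Int) ≠ 0 := by
      rw [hmodc]; exact_mod_cast (by omega : ((tokens.length % M : Nat) : Int) ≠ 0)
    rw [if_pos hz', if_pos hz]
    have hlen1 : 1 ≤ tokens.length := by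
      by_contra hcon
      apply hz
      have : tokens.length = 0 := by omega
      rw [this]; simp
    rw [pv_pyGet_neg_one _ (pv_blocks_ne_nil M hM tokens hlen1)]
  · have hz' : ¬ (PySem.Int.mod (PySem.List.len tokens) (M : Int) ≠ 0) := by
      rw [hmodc]
      simp only [ne_eq, not_not] at hz ⊢
      exact_mod_cast hz
    rw [if_neg hz', if_neg hz]

-- ===== VERDICT (by name: the statement is the Claim_ definition above) =====
theorem split_texts_by_word_limit_spec : Claim_equal_split_texts_by_word_limit := by
  intro texts m _ hm
  unfold Spec_split_texts_by_word_limit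
  unfold Pre_split_texts_by_word_limit at hm
  have hcast : ((m.toNat : Nat) : Int) = m := by omega
  rw [pv_portA_eq, show m = ((m.toNat : Nat) : Int) from hcast.symm,
      pv_portB_eq texts m.toNat (by omega)]
  have h1 := pv_fold_eq_chunk ("Page" ++ PySem.Int.toStr (PySem.List.len texts) ++ ":")
    m.toNat (by omega) (pvTokensB texts).length (pvTokensB texts) le_rfl []
  rw [h1]
  exact pv_chunk_eq_patched _ m.toNat (by omega) (pvTokensB texts).length _ le_rfl
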